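-- pv_equiv track=rewrite | github.com/zahraarmantech/scbs | scbs_clean/research_history/approach_3_baseline/clustering.py | get_cluster_labels
-- ===== SOURCE A (Python) =====
-- from collections import defaultdict, Counter
--
-- def get_cluster_labels(word_clusters: dict,
--                        cooc: dict,
--                        n_clusters: int) -> dict:
--     """
--     Find the top 5 most representative words per cluster.
--     Returns: {cluster_id: [word1, word2, ...]}
--     """
--     buckets = defaultdict(list)
--     for word, cid in word_clusters.items():
--         total = sum(cooc.get(word, {}).values())
--         buckets[cid].append((total, word))
--
--     labels = {}
--     for cid in range(n_clusters):
--         words = sorted(buckets.get(cid, []), reverse=True)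
--         labels[cid] = [w for _, w in words[:5]]
--     return labels
-- ===== SOURCE B (Python) =====
-- def get_cluster_labels(word_clusters: dict,
--                        cooc: dict,
--                        n_clusters: int) -> dict:
--     entries = sorted(
--         ((sum(cooc.get(w, {}).values()), w, c) for w, c in word_clusters.items()),
--         key=lambda e: (e[0], e[1]),
--         reverse=True,
--     )
--     return {cid: [w for _, w, c in entries if c == cid][:5]
--             for cid in range(n_clusters)}
-- ===== Notes on version B (the rewrite author's own statement) =====
-- stated objective: alternative
-- what changed: Replaces per-cluster bucketing followed by a separate sort of every bucket with one global descending sort of (total, word, cid) triples and a single filtered pass per cluster taking the first 5.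
import Mathlib
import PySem

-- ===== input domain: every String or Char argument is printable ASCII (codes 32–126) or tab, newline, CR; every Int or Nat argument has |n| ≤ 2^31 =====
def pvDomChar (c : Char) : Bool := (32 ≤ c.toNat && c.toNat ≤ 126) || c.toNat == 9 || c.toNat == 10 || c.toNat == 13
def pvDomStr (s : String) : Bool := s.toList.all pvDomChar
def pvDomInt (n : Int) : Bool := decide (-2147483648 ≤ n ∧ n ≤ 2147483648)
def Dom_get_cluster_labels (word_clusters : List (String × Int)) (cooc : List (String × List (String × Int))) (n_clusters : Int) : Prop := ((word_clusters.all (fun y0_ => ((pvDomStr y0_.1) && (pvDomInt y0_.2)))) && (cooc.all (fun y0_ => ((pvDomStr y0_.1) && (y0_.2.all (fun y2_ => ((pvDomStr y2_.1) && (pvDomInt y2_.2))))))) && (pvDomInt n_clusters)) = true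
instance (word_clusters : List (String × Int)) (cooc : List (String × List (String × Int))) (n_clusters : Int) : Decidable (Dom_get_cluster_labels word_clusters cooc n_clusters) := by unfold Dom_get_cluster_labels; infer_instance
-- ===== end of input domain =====

-- B replaces A's per-cluster bucketing + per-bucket sorts with ONE global descending
-- sort of (total, word, cid) triples and a filtered take-5 pass per cluster (objective: alternative).

-- shared input reading both Pythons perform identically: sum(cooc.get(w, {}).values())
def pvTot (cooc : List (String × List (String × Int))) (w : String) : Int :=
  ((PySem.Dict.ofList ((PySem.Dict.ofList cooc).getD w [])).values).sum

-- ===== PORT A =====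
def get_cluster_labels (word_clusters : List (String × Int)) (cooc : List (String × List (String × Int))) (n_clusters : Int) : List (Int × List String) :=
  -- buckets = defaultdict(list); for word, cid in word_clusters.items(): buckets[cid].append((total, word))
  let buckets := (PySem.Dict.ofList word_clusters).items.foldl
    (fun b p => b.modify p.2 [] (fun l => l ++ [(pvTot cooc p.1, p.1)]))
    (PySem.Dict.empty : PySem.Dict Int (List (Int × String)))
  -- labels = {}; for cid in range(n_clusters): labels[cid] = [w for _, w in sorted(buckets.get(cid, []), reverse=True)[:5]]
  let labels := (PySem.List.pyRange 0 n_clusters 1).foldl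
    (fun d cid =>
      let words := PySem.List.sorted2 (buckets.getD cid []) (fun x => x.1) (fun x => x.2) true
      d.insert cid ((words.take 5).map (fun x => x.2)))
    (PySem.Dict.empty : PySem.Dict Int (List String))
  labels.items

-- ===== PORT B =====
def get_cluster_labels_alt (word_clusters : List (String × Int)) (cooc : List (String × List (String × Int))) (n_clusters : Int) : List (Int × List String) :=
  -- entries = sorted(((total, w, c) for w, c in word_clusters.items()), key=lambda e: (e[0], e[1]), reverse=True)
  let entries := PySem.List.sorted2
    ((PySem.Dict.ofList word_clusters).items.map (fun p => (pvTot cooc p.1, p.1, p.2)))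
    (fun e => e.1) (fun e => e.2.1) true
  -- {cid: [w for _, w, c in entries if c == cid][:5] for cid in range(n_clusters)}
  (PySem.List.pyRange 0 n_clusters 1).map
    (fun cid => (cid, ((entries.filter (fun e => e.2.2 == cid)).map (fun e => e.2.1)).take 5))

-- ===== PRECONDITION & SPEC =====
def Spec_get_cluster_labels (word_clusters : List (String × Int)) (cooc : List (String × List (String × Int))) (n_clusters : Int) (out : List (Int × List String)) : Prop := out = get_cluster_labels_alt word_clusters cooc n_clusters
instance (word_clusters : List (String × Int)) (cooc : List (String × List (String × Int))) (n_clusters : Int) (out : List (Int × List String)) : Decidable (Spec_get_cluster_labels word_clusters cooc n_clusters out) := by unfold Spec_get_cluster_labels; infer_instance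

-- ===== CLAIM (what is proved, stated in full; the proofs are below) =====
def Claim_equal_get_cluster_labels : Prop := ∀ (word_clusters : List (String × Int)) (cooc : List (String × List (String × Int))) (n_clusters : Int), Dom_get_cluster_labels word_clusters cooc n_clusters → Spec_get_cluster_labels word_clusters cooc n_clusters (get_cluster_labels word_clusters cooc n_clusters)

-- ===== LEMMAS AND PROOFS =====

-- sorted2 with an (Int, String) tuple key is sorted with the lexicographic key
lemma pv_sorted2_eq_sorted_lex {α : Type} (xs : List α) (k1 : α → Int) (k2 : α → String) :
    PySem.List.sorted2 xs k1 k2 true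
      = PySem.List.sorted xs (fun x => toLex (k1 x, k2 x)) true := by
  rw [PySem.List.sorted_rev_eq_foldl_insertBy]
  unfold PySem.List.sorted2
  have hbf : (fun a b : α => decide (k1 b < k1 a) || (!decide (k1 a < k1 b) && decide (k2 b < k2 a)))
      = (fun a b : α => decide (toLex (k1 b, k2 b) < toLex (k1 a, k2 a))) := by
    funext a b
    have hiff : (toLex (k1 b, k2 b) < toLex (k1 a, k2 a))
        ↔ (k1 b < k1 a ∨ (¬ k1 a < k1 b ∧ k2 b < k2 a)) := by
      rw [Prod.Lex.lt_iff]
      simp only [ofLex_toLex]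
      constructor
      · rintro (h | ⟨h, h2⟩)
        · exact Or.inl h
        · exact Or.inr ⟨by simp [h], h2⟩
      · rintro (h | ⟨h, h2⟩)
        · exact Or.inl h
        · by_cases h3 : k1 b < k1 a
          · exact Or.inl h3
          · exact Or.inr ⟨le_antisymm (not_lt.mp h) (not_lt.mp h3), h2⟩
    rw [decide_eq_decide.mpr hiff, Bool.decide_or, Bool.decide_and, decide_not]
  simp only [hbf]
  rfl

-- any strictly key-decreasing rearrangement IS the reverse tuple-key sort
lemma pv_sorted2_rev_eq {α : Type} (xs ys : List α) (k1 : α → Int) (k2 : α → String)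
    (hperm : ys.Perm xs)
    (hpw : ys.Pairwise (fun a b => toLex (k1 b, k2 b) < toLex (k1 a, k2 a))) :
    PySem.List.sorted2 xs k1 k2 true = ys := by
  rw [pv_sorted2_eq_sorted_lex]
  exact PySem.List.sorted_rev_eq_of_perm_of_pairwise_gt _ _ _ hperm hpw

-- weak descending order + distinct keys gives strict descending order
lemma pv_pairwise_lt {α κ : Type} [LinearOrder κ] (key : α → κ) :
    ∀ (l : List α), l.Pairwise (fun a b => key b ≤ key a) → (l.map key).Nodup →
      l.Pairwise (fun a b => key b < key a) := by
  intro l h1 h2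
  induction l with
  | nil => exact List.Pairwise.nil
  | cons x t ih =>
    rw [List.pairwise_cons] at h1 ⊢
    rw [List.map_cons, List.nodup_cons] at h2
    refine ⟨fun b hb => lt_of_le_of_ne (h1.1 b hb) ?_, ih h1.2 h2.2⟩
    intro he
    exact h2.1 (he ▸ List.mem_map_of_mem hb)

-- A's buckets loop: the bucket of cid is the filtered, projected item list
lemma pv_bucket (items : List (String × Int)) (tot : String → Int) (cid : Int) :
    (items.foldl (fun b p => b.modify p.2 [] (fun l => l ++ [(tot p.1, p.1)]))
        (PySem.Dict.empty : PySem.Dict Int (List (Int × String)))).getD cid []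
      = (items.filter (fun p => p.2 == cid)).map (fun p => (tot p.1, p.1)) := by
  have h := PySem.Dict.getD_foldl_modify_append
      (items.map (fun p => (p.2, (tot p.1, p.1)))) (PySem.Dict.empty) cid
  rw [List.foldl_map] at h
  simpa [List.filter_map, Function.comp] using h

-- the heart: top-5 of the per-cid sorted bucket = take-5 of the filtered global sort
lemma pv_main (items : List (String × Int)) (tot : String → Int)
    (hnd : (items.map (fun p => p.1)).Nodup) (cid : Int) :
    ((PySem.List.sorted2 ((items.filter (fun p => p.2 == cid)).map (fun p => (tot p.1, p.1)))
        (fun x => x.1) (fun x => x.2) true).take 5).map (fun x => x.2)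
      = (((PySem.List.sorted2 (items.map (fun p => (tot p.1, p.1, p.2)))
            (fun e => e.1) (fun e => e.2.1) true).filter (fun e => e.2.2 == cid)).map
          (fun e => e.2.1)).take 5 := by
  set E := items.map (fun p => (tot p.1, p.1, p.2)) with hE
  set S := PySem.List.sorted2 E (fun e => e.1) (fun e => e.2.1) true with hSdef
  set q : Int × String × Int → Bool := fun e => e.2.2 == cid with hq
  set proj : Int × String × Int → Int × String := fun e => (e.1, e.2.1) with hproj
  have hSperm : S.Perm E := PySem.List.sorted2_perm _ _ _ _
  have hkeynd : (S.map (fun e => toLex (e.1, e.2.1))).Nodup := by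
    refine (hSperm.map _).nodup_iff.mpr ?_
    have : E.map (fun e => toLex (e.1, e.2.1))
        = (items.map (fun p => p.1)).map (fun w => toLex (tot w, w)) := by
      simp [hE, List.map_map, Function.comp]
    rw [this]
    refine hnd.map ?_
    intro a b h
    exact congrArg (fun x => (ofLex x).2) h
  have hpw : S.Pairwise (fun a b =>
      toLex (b.1, b.2.1) < toLex (a.1, a.2.1)) := by
    refine pv_pairwise_lt (fun e => toLex (e.1, e.2.1)) S ?_ hkeynd
    rw [hSdef, pv_sorted2_eq_sorted_lex]
    exact PySem.List.sorted_pairwise_rev _ _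
  have h1 : PySem.List.sorted2 ((items.filter (fun p => p.2 == cid)).map (fun p => (tot p.1, p.1)))
      (fun x => x.1) (fun x => x.2) true = (S.filter q).map proj := by
    apply pv_sorted2_rev_eq
    · have h2 : (E.filter q).map proj
          = (items.filter (fun p => p.2 == cid)).map (fun p => (tot p.1, p.1)) := by
        simp [hE, hq, hproj, List.filter_map, List.map_map, Function.comp_def]
      exact h2 ▸ ((hSperm.filter q).map proj)
    · rw [List.pairwise_map]
      exact (hpw.filter q).imp (fun h => h)
  rw [h1]
  simp [← List.map_take, List.map_map, hproj, Function.comp]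

lemma pv_pyRange_nodup (n : Int) : (PySem.List.pyRange 0 n 1).Nodup := by
  unfold PySem.List.pyRange
  split
  · simp
  · refine List.Nodup.map ?_ (List.nodup_range)
    intro a b h
    simpa using h

lemma pv_items_foldl_insert_id {ν : Type} (l : List Int) (v : Int → ν) (hn : l.Nodup) :
    (l.foldl (fun d a => d.insert a (v a)) (PySem.Dict.empty : PySem.Dict Int ν)).items
      = l.map (fun a => (a, v a)) := by
  have h := PySem.Dict.items_foldl_insert_fresh l (fun a => a) v PySem.Dict.empty
      (by intro a _; exact PySem.Dict.contains_empty a) (by simpa using hn)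
  simpa using h

-- ===== VERDICT (by name: the statement is the Claim_ definition above) =====
theorem get_cluster_labels_spec : Claim_equal_get_cluster_labels := by
  unfold Claim_equal_get_cluster_labels
  intro wc cooc n _
  unfold Spec_get_cluster_labels get_cluster_labels get_cluster_labels_alt
  simp only []
  rw [pv_items_foldl_insert_id _ _ (pv_pyRange_nodup n)]
  apply List.map_congr_left
  intro cid _
  have hnd : (((PySem.Dict.ofList wc).items).map (fun p => p.1)).Nodup := by
    have h := PySem.Dict.nodup_keys_ofList (ps := wc)
    simpa [PySem.Dict.keys] using h
  rw [pv_bucket, pv_main _ _ hnd]
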